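-- pv_equiv track=rewrite | github.com/portante/glusterfs | ufo/gluster/swift/common/DiskDir.py | filter_delimiter
-- ===== SOURCE A (Python) =====
-- def filter_delimiter(objects, delimiter, prefix):
--     """
--     Accept a sorted list of strings and return strings will only
--     be those that start with the prefix.
--     """
--     assert delimiter and len(delimiter) == 1 and ord(delimiter) <= 254
--     last_obj_name = ''
--     if prefix:
--         for object_name in objects:
--             tmp_obj = object_name.replace(prefix, '', 1)
--             suffix = tmp_obj.split(delimiter, 1)
--             new_obj_name = prefix + suffix[0]
--             if new_obj_name and new_obj_name != last_obj_name:
--                 last_obj_name = new_obj_name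
--                 yield new_obj_name
--     else:
--         for object_name in objects:
--             new_obj_name = object_name.split(delimiter, 1)[0]
--             if not new_obj_name:
--                 continue
--             new_obj_name += delimiter
--             if new_obj_name != last_obj_name:
--                 last_obj_name = new_obj_name
--                 yield new_obj_name
-- ===== SOURCE B (Python) =====
-- def filter_delimiter(objects, delimiter, prefix):
--     """
--     Same contract as A, different decomposition: first materialise the
--     whole sequence of truncated keys, then collapse consecutive
--     duplicate keys by comparing each key with the one right before it
--     (zip with the shifted list) instead of threading a last_obj_name
--     accumulator through the loop.
--     """
--     assert delimiter and len(delimiter) == 1 and ord(delimiter) <= 254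
--     if prefix:
--         keys = [prefix + o.replace(prefix, '', 1).split(delimiter, 1)[0]
--                 for o in objects]
--     else:
--         keys = [b + delimiter
--                 for b in (o.split(delimiter, 1)[0] for o in objects) if b]
--     if keys:
--         yield keys[0]
--         for prev, k in zip(keys, keys[1:]):
--             if k != prev:
--                 yield k
-- ===== Notes on version B (the rewrite author's own statement) =====
-- stated objective: alternative
-- what changed: The stateful last_obj_name dedup loop is replaced by a two-phase decomposition: build the full list of truncated keys (with the empty-key filter applied up front), then collapse consecutive duplicates statelessly by zipping the key list with its own tail and keeping keys that differ from their predecessor.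
import Mathlib
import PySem

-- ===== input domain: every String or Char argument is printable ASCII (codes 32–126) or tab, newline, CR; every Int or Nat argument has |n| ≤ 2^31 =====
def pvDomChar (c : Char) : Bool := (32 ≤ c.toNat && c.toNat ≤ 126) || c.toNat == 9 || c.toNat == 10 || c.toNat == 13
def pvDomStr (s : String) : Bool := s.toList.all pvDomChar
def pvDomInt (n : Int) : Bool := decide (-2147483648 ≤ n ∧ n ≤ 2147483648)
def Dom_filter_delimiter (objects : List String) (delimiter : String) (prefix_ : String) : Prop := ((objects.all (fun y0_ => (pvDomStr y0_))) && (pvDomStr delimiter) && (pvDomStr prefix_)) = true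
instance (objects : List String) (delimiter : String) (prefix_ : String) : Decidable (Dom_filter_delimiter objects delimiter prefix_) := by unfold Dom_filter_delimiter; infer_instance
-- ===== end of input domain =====

-- B replaces A's stateful last_obj_name dedup loop with a two-phase decomposition
-- (materialise all truncated keys, then drop keys equal to their predecessor via zip
-- with the shifted list); same cost, different structure. A is a Python generator;
-- both ports return the list of yielded values.


-- ===== PORT A =====
-- hand port of Python's s.replace(pat, '', 1) (remove the leftmost occurrence of pat,
-- if any; exact also for pat = '', where Python returns s unchanged)
def pvReplaceFirst : List Char → List Char → List Char
  | [], _ => []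
  | c :: rest, pat =>
    if pat.isPrefixOf (c :: rest) then (c :: rest).drop pat.length
    else c :: pvReplaceFirst rest pat

-- o.split(delimiter, 1)[0]; the defaults are never reached when delimiter ≠ ''
def pvSplitHead (delimiter s : String) : String :=
  (((PySem.Str.splitMax? s delimiter 1).getD []).headD "")

-- prefix + object_name.replace(prefix, '', 1).split(delimiter, 1)[0]
-- (the identical expression occurs in both Pythons, so both ports share it)
def pvKeyPre (delimiter prefix_ o : String) : String :=
  String.ofList (prefix_.toList ++ (pvSplitHead delimiter (String.ofList (pvReplaceFirst o.toList prefix_.toList))).toList)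

def pvLoopPre (delimiter prefix_ : String) : List String → String → List String
  | [], _ => []
  | o :: rest, last =>
    let newName := pvKeyPre delimiter prefix_ o
    if newName ≠ "" ∧ newName ≠ last then newName :: pvLoopPre delimiter prefix_ rest newName
    else pvLoopPre delimiter prefix_ rest last

def pvLoopNo (delimiter : String) : List String → String → List String
  | [], _ => []
  | o :: rest, last =>
    let base := pvSplitHead delimiter o
    if base = "" then pvLoopNo delimiter rest last
    else
      let newName := String.ofList (base.toList ++ delimiter.toList)
      if newName ≠ last then newName :: pvLoopNo delimiter rest newName
      else pvLoopNo delimiter rest last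

def filter_delimiter (objects : List String) (delimiter : String) (prefix_ : String) : List String :=
  if prefix_ ≠ "" then pvLoopPre delimiter prefix_ objects ""
  else pvLoopNo delimiter objects ""

-- ===== PORT B =====
-- keys[0] :: [k for prev, k in zip(keys, keys[1:]) if k != prev]
def pvDedup (keys : List String) : List String :=
  match keys with
  | [] => []
  | k0 :: _ => k0 :: (((keys.zip keys.tail).filter (fun pk => pk.2 ≠ pk.1)).map Prod.snd)

def filter_delimiter_alt (objects : List String) (delimiter : String) (prefix_ : String) : List String :=
  let keys :=
    if prefix_ ≠ "" then objects.map (pvKeyPre delimiter prefix_)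
    else ((objects.map (pvSplitHead delimiter)).filter (fun b => b ≠ "")).map
           (fun b => String.ofList (b.toList ++ delimiter.toList))
  pvDedup keys

-- ===== PRECONDITION & SPEC =====
-- Pre_ is exactly the top assert: delimiter is a single character. (Its other clause,
-- ord(delimiter) <= 254, holds for every character of the domain, whose codes are ≤ 126.)
def Pre_filter_delimiter (objects : List String) (delimiter : String) (prefix_ : String) : Prop :=
  delimiter.toList.length = 1
instance (objects : List String) (delimiter : String) (prefix_ : String) : Decidable (Pre_filter_delimiter objects delimiter prefix_) := by unfold Pre_filter_delimiter; infer_instance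

def pvWitness_filter_delimiter : List String × String × String := (["a/b", "a/c", "d"], "/", "")

def Spec_filter_delimiter (objects : List String) (delimiter : String) (prefix_ : String) (out : List String) : Prop := out = filter_delimiter_alt objects delimiter prefix_
instance (objects : List String) (delimiter : String) (prefix_ : String) (out : List String) : Decidable (Spec_filter_delimiter objects delimiter prefix_ out) := by unfold Spec_filter_delimiter; infer_instance

-- ===== CLAIM (what is proved, stated in full; the proofs are below) =====
def Claim_equal_filter_delimiter : Prop := ∀ (objects : List String) (delimiter : String) (prefix_ : String), Dom_filter_delimiter objects delimiter prefix_ → Pre_filter_delimiter objects delimiter prefix_ → Spec_filter_delimiter objects delimiter prefix_ (filter_delimiter objects delimiter prefix_)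

-- ===== LEMMAS AND PROOFS =====

-- proof-side abstraction: collapse consecutive runs, seeded with `last`
def pvRun : List String → String → List String
  | [], _ => []
  | k :: rest, last => if k ≠ last then k :: pvRun rest k else pvRun rest last

theorem pvPairs_eq : ∀ (ks : List String) (prev : String),
    (((prev :: ks).zip ks).filter (fun pk => pk.2 ≠ pk.1)).map Prod.snd = pvRun ks prev := by
  intro ks
  induction ks with
  | nil => intro prev; rfl
  | cons x xs ih =>
    intro prev
    by_cases h : x = prev
    · simpa [pvRun, h] using ih prev
    · simpa [pvRun, h] using ih x

theorem pvDedup_eq_run (ks : List String) (h : ∀ k ∈ ks, k ≠ "") :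
    pvDedup ks = pvRun ks "" := by
  cases ks with
  | nil => rfl
  | cons k0 rest =>
    have hk0 : k0 ≠ "" := h k0 (by simp)
    simp only [pvDedup, List.tail_cons, pvRun, if_pos hk0]
    exact congrArg (k0 :: ·) (pvPairs_eq rest k0)

theorem pvKeyPre_ne (delimiter prefix_ o : String) (h : prefix_ ≠ "") :
    pvKeyPre delimiter prefix_ o ≠ "" := by
  unfold pvKeyPre
  intro h0
  apply h
  have h1 := congrArg String.toList h0
  simp at h1
  exact h1.1

theorem pvLoopPre_eq_run (delimiter prefix_ : String) (h : prefix_ ≠ "") :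
    ∀ (objs : List String) (last : String),
      pvLoopPre delimiter prefix_ objs last = pvRun (objs.map (pvKeyPre delimiter prefix_)) last := by
  intro objs
  induction objs with
  | nil => intro last; rfl
  | cons o rest ih =>
    intro last
    have hne := pvKeyPre_ne delimiter prefix_ o h
    by_cases hl : pvKeyPre delimiter prefix_ o = last
    · simp [pvLoopPre, pvRun, hl, ih]
    · simp [pvLoopPre, pvRun, hne, hl, ih]

theorem pvLoopNo_eq_run (delimiter : String) :
    ∀ (objs : List String) (last : String),
      pvLoopNo delimiter objs last =
        pvRun (((objs.map (pvSplitHead delimiter)).filter (fun b => b ≠ "")).map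
                 (fun b => String.ofList (b.toList ++ delimiter.toList))) last := by
  intro objs
  induction objs with
  | nil => intro last; rfl
  | cons o rest ih =>
    intro last
    by_cases hb : pvSplitHead delimiter o = ""
    · simp [pvLoopNo, hb, ih]
    · by_cases hl : pvSplitHead delimiter o ++ delimiter = last
      · simp [pvLoopNo, pvRun, hb, hl, ih]
      · simp [pvLoopNo, pvRun, hb, hl, ih]

theorem pvAppendKey_ne (b delimiter : String) (hd : delimiter ≠ "") :
    String.ofList (b.toList ++ delimiter.toList) ≠ "" := by
  intro h0
  have h1 := congrArg String.toList h0
  simp at h1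
  exact hd h1.2

-- ===== VERDICT (by name: the statement is the Claim_ definition above) =====
theorem filter_delimiter_spec : Claim_equal_filter_delimiter := by
  intro objects delimiter prefix_ _hdom hpre
  unfold Pre_filter_delimiter at hpre
  unfold Spec_filter_delimiter filter_delimiter filter_delimiter_alt
  have hd : delimiter ≠ "" := by
    intro h; rw [h] at hpre; simp at hpre
  by_cases hp : prefix_ = ""
  · rw [if_neg (by simpa using hp), if_neg (by simpa using hp),
        pvLoopNo_eq_run, pvDedup_eq_run]
    intro k hk
    simp only [List.mem_map] at hk
    obtain ⟨b, _, rfl⟩ := hk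
    exact pvAppendKey_ne b delimiter hd
  · rw [if_pos hp, if_pos hp, pvLoopPre_eq_run delimiter prefix_ hp, pvDedup_eq_run]
    intro k hk
    simp only [List.mem_map] at hk
    obtain ⟨o, _, rfl⟩ := hk
    exact pvKeyPre_ne delimiter prefix_ o hp
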